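-- pv_equiv track=rewrite | github.com/Sinchiguano/TestdomePython | goodAI/task3.py | even_odd_number
-- ===== SOURCE A (Python) =====
-- def even_odd_number(num):
--     'This function check if a number is even or odd, then proceeds to cluster each of them to even or odd group.'
--     tmp=list()
--     aux=list()
--     for i in range(len(num)):
--         if num[i]%2==0:#even number
--             tmp.append(num[i])
--         else:#odd number
--             aux.append(num[i])
--     tmp_=sorted(tmp, reverse=False)
--     aux_=sorted(aux, reverse=False)
--     return tmp_,aux_
-- ===== SOURCE B (Python) =====
-- def even_odd_number(num):
--     'Sort once, then partition the sorted list into evens and odds (each comes out already sorted).'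
--     evens = []
--     odds = []
--     for v in sorted(num):
--         if v % 2 == 0:
--             evens.append(v)
--         else:
--             odds.append(v)
--     return evens, odds
-- ===== Notes on version B (the rewrite author's own statement) =====
-- stated objective: simpler
-- what changed: B sorts the whole list once and then partitions the sorted list in one element-wise pass, instead of A's index-loop partition followed by two separate sorts.
import Mathlib
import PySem

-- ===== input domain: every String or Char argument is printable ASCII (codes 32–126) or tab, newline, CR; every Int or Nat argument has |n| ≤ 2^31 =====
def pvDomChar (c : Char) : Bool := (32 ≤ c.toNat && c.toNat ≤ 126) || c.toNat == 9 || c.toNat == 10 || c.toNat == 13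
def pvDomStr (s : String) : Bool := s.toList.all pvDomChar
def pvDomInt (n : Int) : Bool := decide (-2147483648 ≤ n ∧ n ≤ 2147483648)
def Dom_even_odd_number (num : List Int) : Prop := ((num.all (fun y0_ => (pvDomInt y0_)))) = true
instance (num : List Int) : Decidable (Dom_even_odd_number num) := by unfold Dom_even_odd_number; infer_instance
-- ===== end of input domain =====

-- B sorts the whole list once and then partitions the sorted list in one pass (simpler decomposition than A's partition-then-two-sorts).


-- ===== PORT A =====
-- for i in range(len(num)): append num[i] to tmp (even) or aux (odd); then sort each
def even_odd_number (num : List Int) : List Int × List Int :=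
  let st :=
    (PySem.List.pyRange 0 (num.length : Int) 1).foldl
      (fun (st : List Int × List Int) i =>
        if PySem.Int.mod (PySem.List.pyGetD num i 0) 2 = 0 then
          (st.1 ++ [PySem.List.pyGetD num i 0], st.2)
        else
          (st.1, st.2 ++ [PySem.List.pyGetD num i 0]))
      ([], [])
  (PySem.List.sorted st.1 (fun x => x) false, PySem.List.sorted st.2 (fun x => x) false)

-- ===== PORT B =====
-- evens/odds filled by one pass over sorted(num)
def even_odd_number_alt (num : List Int) : List Int × List Int :=
  (PySem.List.sorted num (fun x => x) false).foldl
    (fun (st : List Int × List Int) v =>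
      if PySem.Int.mod v 2 = 0 then (st.1 ++ [v], st.2) else (st.1, st.2 ++ [v]))
    ([], [])

-- ===== PRECONDITION & SPEC =====
def Spec_even_odd_number (num : List Int) (out : List Int × List Int) : Prop := out = even_odd_number_alt num
instance (num : List Int) (out : List Int × List Int) : Decidable (Spec_even_odd_number num out) := by unfold Spec_even_odd_number; infer_instance

-- ===== CLAIM (what is proved, stated in full; the proofs are below) =====
def Claim_equal_even_odd_number : Prop := ∀ (num : List Int), Dom_even_odd_number num → Spec_even_odd_number num (even_odd_number num)

-- ===== LEMMAS AND PROOFS =====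

-- the pair-state partition fold equals appended filters
theorem partition_foldl (xs t a : List Int) :
    xs.foldl
      (fun (st : List Int × List Int) v =>
        if PySem.Int.mod v 2 = 0 then (st.1 ++ [v], st.2) else (st.1, st.2 ++ [v]))
      (t, a)
    = (t ++ xs.filter (fun v => PySem.Int.mod v 2 = 0),
       a ++ xs.filter (fun v => ¬ PySem.Int.mod v 2 = 0)) := by
  induction xs generalizing t a with
  | nil => simp
  | cons x xs ih =>
    by_cases h : PySem.Int.mod x 2 = 0
    · rw [List.foldl_cons, if_pos h, ih]
      simp only [PySem.Int.mod, Int.fmod_eq_emod] at h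
      simp [List.filter_cons]
      omega
    · rw [List.foldl_cons, if_neg h, ih]
      simp only [PySem.Int.mod, Int.fmod_eq_emod] at h
      simp [List.filter_cons]
      omega

theorem even_odd_number_spec : Claim_equal_even_odd_number := by
  intro num _
  unfold Spec_even_odd_number
  simp only [even_odd_number, even_odd_number_alt]
  have hA := PySem.List.foldl_pyRange_pyGetD' (xs := num) (d := (0 : Int)) (a := 0)
      (f := fun (st : List Int × List Int) v =>
        if PySem.Int.mod v 2 = 0 then (st.1 ++ [v], st.2) else (st.1, st.2 ++ [v]))
      (init := (([], []) : List Int × List Int)) (by norm_num)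
  simp only [Int.toNat_zero, List.drop_zero] at hA
  rw [hA]
  rw [partition_foldl, partition_foldl]
  simp only [List.nil_append]
  rw [Prod.mk.injEq]
  refine ⟨?_, ?_⟩
  · exact (PySem.List.sorted_id_eq_of_perm_of_pairwise _ _
      (((PySem.List.sorted_perm num (fun x => x) false).filter _))
      ((PySem.List.sorted_pairwise num (fun x => x)).filter _))
  · exact (PySem.List.sorted_id_eq_of_perm_of_pairwise _ _
      (((PySem.List.sorted_perm num (fun x => x) false).filter _))
      ((PySem.List.sorted_pairwise num (fun x => x)).filter _))
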